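-- pv_equiv track=rewrite | github.com/RandFa/Bioinformatics | replication.py | FasterSymbolArrayIns
-- ===== SOURCE A (Python) =====
-- def PatternCount(Pattern, Text):
--     """
--     input:
--     Text is a string of DNA
--     Pattern is a string (k mer we are looking for)
--     output: count of Pattern occurences in Text
--     """
--     count = 0
--     for i in range(len(Text) - len(Pattern)+1):
--         if Text[i:i+len(Pattern)] == Pattern:
--             count = count + 1
--     return count
--
-- def FasterSymbolArrayIns(Genome, symbol):
--     """
--     form instructors
--     mine is more correct because it considers differnet lengths of sympol
--     """
--     array = {}
--     n = len(Genome)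
--     ExtendedGenome = Genome + Genome[0:n//2]
--
--     # look at the first half of Genome to compute first array value
--     array[0] = PatternCount(symbol, Genome[0:n//2])
--
--     for i in range(1, n):
--         # start by setting the current array value equal to the previous array value
--         array[i] = array[i-1]
--
--         # the current array value can differ from the previous array value by at most 1
--         if ExtendedGenome[i-1] == symbol:
--             array[i] = array[i]-1
--         if ExtendedGenome[i+(n//2)-1] == symbol:
--             array[i] = array[i]+1
--     return array
-- ===== SOURCE B (Python) =====
-- def FasterSymbolArrayIns(Genome, symbol):
--     n = len(Genome)
--     half = n // 2
--     ext = Genome + Genome[:half]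
--     gh = Genome[:half]
--     m = len(symbol)
--     # count of symbol occurrences in the first half (array[0])
--     first = sum(1 for i in range(len(gh) - m + 1) if gh[i:i + m] == symbol)
--     # prefix table: P[k] = number of positions j < k with ext[j] == symbol
--     P = [0]
--     t = 0
--     for c in ext:
--         t += 1 if c == symbol else 0
--         P.append(t)
--     res = {0: first}
--     for i in range(1, n):
--         res[i] = first - P[i] + P[i + half] - P[half]
--     return res
-- ===== Notes on version B (the rewrite author's own statement) =====
-- stated objective: alternative
-- what changed: Replaces A's sequential dict recurrence (each entry derived from the previous one by two +-1 adjustments) with a prefix-count table over the extended genome and a closed-form arithmetic expression per index.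
import Mathlib
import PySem

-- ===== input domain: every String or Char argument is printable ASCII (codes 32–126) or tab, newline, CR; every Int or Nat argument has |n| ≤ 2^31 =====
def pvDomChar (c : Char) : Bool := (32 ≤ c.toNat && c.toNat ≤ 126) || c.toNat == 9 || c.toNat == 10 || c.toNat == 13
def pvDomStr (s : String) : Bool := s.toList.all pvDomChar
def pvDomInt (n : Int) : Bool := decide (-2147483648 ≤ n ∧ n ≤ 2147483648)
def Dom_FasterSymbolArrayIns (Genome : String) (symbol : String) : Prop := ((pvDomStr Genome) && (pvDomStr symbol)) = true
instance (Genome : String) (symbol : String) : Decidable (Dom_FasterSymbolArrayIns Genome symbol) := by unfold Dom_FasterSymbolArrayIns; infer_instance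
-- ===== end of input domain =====

-- B replaces A's step-by-step incremental dict recurrence by a prefix-count table over the
-- extended genome plus a closed-form arithmetic pass (objective: alternative decomposition).

-- ===== PORT A =====
-- helper PatternCount from the same module
def pvPatternCount (Pattern : List Char) (Text : List Char) : Int :=
  (PySem.List.pyRange 0 ((Text.length : Int) - (Pattern.length : Int) + 1) 1).foldl
    (fun count i =>
      if PySem.List.slice Text (some i) (some (i + (Pattern.length : Int))) = Pattern
      then count + 1 else count) 0

def FasterSymbolArrayIns (Genome : String) (symbol : String) : List (Int × Int) :=
  let g := Genome.toList
  let s := symbol.toList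
  let n : Int := (g.length : Int)
  let ExtendedGenome := g ++ PySem.List.slice g (some 0) (some (PySem.Int.floordiv n 2))
  let d0 : PySem.Dict Int Int :=
    PySem.Dict.empty.insert 0 (pvPatternCount s (PySem.List.slice g (some 0) (some (PySem.Int.floordiv n 2))))
  -- every index i-1 and i + n//2 - 1 taken below is in range, so pyGetD is exact here
  let d := (PySem.List.pyRange 1 n 1).foldl (fun d i =>
    let v := d.getD (i - 1) 0
    let v := if [PySem.List.pyGetD ExtendedGenome (i - 1) ' '] = s then v - 1 else v
    let v := if [PySem.List.pyGetD ExtendedGenome (i + PySem.Int.floordiv n 2 - 1) ' '] = s then v + 1 else v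
    d.insert i v) d0
  d.items

-- ===== PORT B =====
def FasterSymbolArrayIns_alt (Genome : String) (symbol : String) : List (Int × Int) :=
  let g := Genome.toList
  let s := symbol.toList
  let n : Int := (g.length : Int)
  let half := PySem.Int.floordiv n 2
  let ext := g ++ PySem.List.slice g none (some half)
  let gh := PySem.List.slice g none (some half)
  let first : Int :=
    ((PySem.List.pyRange 0 ((gh.length : Int) - (s.length : Int) + 1) 1).map
      (fun i => if PySem.List.slice gh (some i) (some (i + (s.length : Int))) = s then (1 : Int) else 0)).sum
  let Pt := ext.foldl (fun (acc : List Int × Int) c =>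
      let t := acc.2 + (if [c] = s then (1 : Int) else 0)
      (acc.1 ++ [t], t)) ([(0 : Int)], (0 : Int))
  let P := Pt.1
  let res : PySem.Dict Int Int := PySem.Dict.empty.insert 0 first
  let res := (PySem.List.pyRange 1 n 1).foldl (fun d i =>
    d.insert i (first - PySem.List.pyGetD P i 0 + PySem.List.pyGetD P (i + half) 0 - PySem.List.pyGetD P half 0)) res
  res.items

-- ===== PRECONDITION & SPEC =====
def Spec_FasterSymbolArrayIns (Genome : String) (symbol : String) (out : List (Int × Int)) : Prop := out = FasterSymbolArrayIns_alt Genome symbol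
instance (Genome : String) (symbol : String) (out : List (Int × Int)) : Decidable (Spec_FasterSymbolArrayIns Genome symbol out) := by unfold Spec_FasterSymbolArrayIns; infer_instance

-- ===== CLAIM (what is proved, stated in full; the proofs are below) =====
def Claim_equal_FasterSymbolArrayIns : Prop := ∀ (Genome : String) (symbol : String), Dom_FasterSymbolArrayIns Genome symbol → Spec_FasterSymbolArrayIns Genome symbol (FasterSymbolArrayIns Genome symbol)

-- ===== LEMMAS AND PROOFS =====

-- c j : the 0/1 indicator A's two if-tests add or subtract at position j of the extended genome
def pvC (ext : List Char) (s : List Char) (j : Nat) : Int :=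
  if [ext.getD j ' '] = s then 1 else 0
def pvF (ext : List Char) (s : List Char) (half : Nat) (first : Int) : Nat → Int
  | 0 => first
  | i + 1 => pvF ext s half first i - pvC ext s i + pvC ext s (i + half)

-- prefix count: number of positions j < k of ext with [ext[j]] = s
def pvPf (ext : List Char) (s : List Char) (k : Nat) : Int :=
  ((ext.take k).countP (fun c => decide ([c] = s)) : Int)

theorem pvFloordiv_two (a : Nat) : PySem.Int.floordiv (a : Int) 2 = ((a / 2 : Nat) : Int) := by
  simp [PySem.Int.floordiv, Int.fdiv_eq_ediv]

theorem pvGet_mk_map_off (m : Nat) : ∀ (a : Int) (Fv : Nat → Int) (j : Nat), j < m →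
    (PySem.Dict.mk ((List.range m).map (fun (i : Nat) => (a + (i : Int), Fv i)))).get? (a + (j : Int)) = some (Fv j) := by
  induction m with
  | zero => intro a Fv j hj; omega
  | succ m ih =>
    intro a Fv j hj
    rw [List.range_succ_eq_map]
    simp only [List.map_cons, List.map_map]
    rw [PySem.Dict.get?_mk_cons]
    rcases j with _ | j'
    · simp
    · have hne : ((a + (0:Nat) == a + ((j' + 1 : Nat) : Int))) = false := by
        simp only [beq_eq_false_iff_ne, ne_eq]; omega
      rw [if_neg (by simp_all)]
      have heq : List.map ((fun (i : Nat) => (a + (i:Int), Fv i)) ∘ Nat.succ) (List.range m)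
          = List.map (fun (i : Nat) => ((a+1) + (i:Int), Fv (i+1))) (List.range m) := by
        apply List.map_congr_left; intro x _; simp [Function.comp]
        ring
      rw [heq]
      have := ih (a + 1) (fun i => Fv (i + 1)) j' (by omega)
      have harg : a + ((j' + 1 : Nat) : Int) = (a + 1) + (j' : Int) := by push_cast; ring
      rw [harg]
      exact this

theorem pvGet_mk_map (m : Nat) (Fv : Nat → Int) (j : Nat) (hj : j < m) :
    (PySem.Dict.mk ((List.range m).map (fun (i : Nat) => ((i : Int), Fv i)))).get? ((j : Int)) = some (Fv j) := by
  have h := pvGet_mk_map_off m 0 Fv j hj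
  simpa using h

theorem pvA_fold (ext s : List Char) (halfN : Nat) (first : Int) :
    ∀ (m : Nat), 1 ≤ m →
    (PySem.List.pyRange 1 (m : Int) 1).foldl (fun d i =>
      PySem.Dict.insert d i
        (if [PySem.List.pyGetD ext (i + (halfN : Int) - 1) ' '] = s then
          (if [PySem.List.pyGetD ext (i - 1) ' '] = s then PySem.Dict.getD d (i - 1) 0 - 1
           else PySem.Dict.getD d (i - 1) 0) + 1
         else
          (if [PySem.List.pyGetD ext (i - 1) ' '] = s then PySem.Dict.getD d (i - 1) 0 - 1
           else PySem.Dict.getD d (i - 1) 0))) (PySem.Dict.empty.insert 0 first)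
    = PySem.Dict.mk ((List.range m).map (fun (i : Nat) => ((i : Int), pvF ext s halfN first i))) := by
  intro m
  induction m with
  | zero => omega
  | succ m ih =>
    intro _
    by_cases hm : 1 ≤ m
    · have hrange : PySem.List.pyRange 1 ((m+1 : Nat) : Int) 1
          = PySem.List.pyRange 1 (m : Int) 1 ++ [(m : Int)] := by
        push_cast
        exact PySem.List.pyRange_one_succ_right (by exact_mod_cast hm)
      rw [hrange, List.foldl_append, ih hm]
      simp only [List.foldl_cons, List.foldl_nil]
      have hget : PySem.Dict.getD (PySem.Dict.mk ((List.range m).map (fun (i : Nat) => ((i : Int), pvF ext s halfN first i)))) ((m : Int) - 1) 0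
          = pvF ext s halfN first (m - 1) := by
        have hcast : ((m : Int) - 1) = ((m - 1 : Nat) : Int) := by omega
        rw [hcast, PySem.Dict.getD_eq_get?_getD, pvGet_mk_map m _ (m-1) (by omega)]
        rfl
      rw [hget]
      have hidx1 : ((m : Int) - 1) = ((m - 1 : Nat) : Int) := by omega
      have hidx2 : ((m : Int) + (halfN : Int) - 1) = (((m - 1) + halfN : Nat) : Int) := by push_cast; omega
      rw [hidx1, hidx2, PySem.List.pyGetD_natCast, PySem.List.pyGetD_natCast]
      apply PySem.Dict.ext
      rw [PySem.Dict.items_insert_of_not_contains]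
      · rw [List.range_succ, List.map_append]
        congr 1
        simp only [List.map_cons, List.map_nil]
        congr 1
        have hm1 : m = (m - 1) + 1 := by omega
        rw [hm1]
        simp only [Nat.add_sub_cancel]
        refine Prod.ext rfl ?_
        simp only [pvF, pvC]
        split_ifs <;> ring
      · rw [PySem.Dict.contains_eq_decide_mem_keys]
        simp only [decide_eq_false_iff_not]
        intro hmem
        rw [PySem.Dict.keys_mk] at hmem
        simp only [List.map_map, List.mem_map, Function.comp] at hmem
        obtain ⟨i, hi, hie⟩ := hmem
        rw [List.mem_range] at hi
        omega
    · have hm0 : m = 0 := by omega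
      subst hm0
      rw [show PySem.List.pyRange 1 ((1:Nat) : Int) 1 = [] from by
        exact PySem.List.pyRange_one_eq_nil (by norm_num)]
      simp only [List.foldl_nil]
      apply PySem.Dict.ext
      simp [pvF]
      rfl

theorem pvP_fold (s : List Char) (l : List Char) : ∀ (acc : List Int) (t : Int),
    l.foldl (fun (acc : List Int × Int) c =>
      let t := acc.2 + (if [c] = s then (1 : Int) else 0)
      (acc.1 ++ [t], t)) (acc, t)
    = (acc ++ (List.range l.length).map (fun k => t + ((l.take (k+1)).countP (fun c => decide ([c] = s)) : Int)),
       t + ((l.countP (fun c => decide ([c] = s)) : Int)) ) := by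
  induction l with
  | nil => intro acc t; simp
  | cons c l ih =>
    intro acc t
    simp only [List.foldl_cons, List.length_cons]
    rw [ih]
    have hc : (t + (if [c] = s then (1:Int) else 0)) = t + ((if decide ([c] = s) then 1 else 0 : Nat) : Int) := by
      split_ifs <;> simp_all
    apply Prod.ext
    · show (acc ++ [_]) ++ _ = _
      rw [List.range_succ_eq_map]
      simp only [List.map_cons, List.map_map, List.append_assoc, List.singleton_append]
      congr 1
      · simp [List.countP_cons, hc]
        intro a _
        split_ifs <;> simp_all <;> ring
    · show (t + _) + _ = _
      simp only [List.countP_cons, hc]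
      push_cast
      ring

theorem pvPf_succ (ext s : List Char) (k : Nat) (hk : k < ext.length) :
    pvPf ext s (k + 1) = pvPf ext s k + pvC ext s k := by
  unfold pvPf pvC
  have hget : ext[k]? = some ext[k] := List.getElem?_eq_getElem hk
  rw [List.take_succ, hget]
  rw [List.getD_eq_getElem?_getD, hget]
  simp only [Option.toList_some, List.countP_append, List.countP_singleton, Option.getD_some]
  split_ifs <;> simp_all

theorem pvP_getD (ext s : List Char) (k : Nat) (hk : k ≤ ext.length) :
    (([(0:Int)] ++ (List.range ext.length).map
        (fun k => (0:Int) + ((ext.take (k+1)).countP (fun c => decide ([c] = s)) : Int))).getD k 0)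
    = pvPf ext s k := by
  rcases k with _ | k'
  · simp [pvPf]
  · have hk' : k' < ext.length := by omega
    simp only [List.singleton_append, List.getD_cons_succ]
    rw [List.getD_eq_getElem?_getD]
    rw [List.getElem?_map]
    simp [List.getElem?_range hk', pvPf]

theorem pvF_closed (ext s : List Char) (halfN : Nat) (first : Int) (n0 : Nat)
    (hlen : ext.length = n0 + halfN) :
    ∀ (i : Nat), i ≤ n0 →
    pvF ext s halfN first i = first - pvPf ext s i + pvPf ext s (i + halfN) - pvPf ext s halfN := by
  intro i
  induction i with
  | zero => intro _; simp [pvF, pvPf]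
  | succ i ih =>
    intro hi
    have h1 : i < ext.length := by omega
    have h2 : i + halfN < ext.length := by omega
    simp only [pvF]
    rw [ih (by omega)]
    have e1 := pvPf_succ ext s i h1
    have e2 := pvPf_succ ext s (i + halfN) h2
    have : i + 1 + halfN = (i + halfN) + 1 := by omega
    rw [this, e1, e2]
    ring

theorem pvFirst_eq (s gh : List Char) :
    ((PySem.List.pyRange 0 ((gh.length : Int) - (s.length : Int) + 1) 1).map
      (fun i => if PySem.List.slice gh (some i) (some (i + (s.length : Int))) = s then (1 : Int) else 0)).sum
    = pvPatternCount s gh := by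
  unfold pvPatternCount
  rw [PySem.List.foldl_ite_add_one]
  have hfun : (fun (i : Int) => if PySem.List.slice gh (some i) (some (i + (s.length : Int))) = s then (1 : Int) else 0)
      = (fun (i : Int) => if (decide (PySem.List.slice gh (some i) (some (i + (s.length : Int))) = s)) = true then (1 : Int) else 0) := by
    funext i; split_ifs <;> simp_all
  rw [hfun, PySem.List.sum_map_ite_one_zero]
  simp

theorem pvA_items (Genome symbol : String) :
    FasterSymbolArrayIns Genome symbol
    = (List.range (max Genome.toList.length 1)).map (fun (i : Nat) =>
        ((i : Int), pvF (Genome.toList ++ Genome.toList.take (Genome.toList.length / 2)) symbol.toList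
          (Genome.toList.length / 2)
          (pvPatternCount symbol.toList (Genome.toList.take (Genome.toList.length / 2))) i)) := by
  set g := Genome.toList with hg
  set s := symbol.toList with hs
  set n0 := g.length with hn0
  unfold FasterSymbolArrayIns
  simp only [pvFloordiv_two, PySem.List.slice_zero_start, PySem.List.slice_to_natCast]
  by_cases hn : 1 ≤ n0
  · rw [pvA_fold (g ++ g.take (n0/2)) s (n0/2) _ n0 hn]
    have : max n0 1 = n0 := by omega
    rw [this]
  · have h0 : n0 = 0 := by omega
    rw [show PySem.List.pyRange 1 (n0 : Int) 1 = [] from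
      PySem.List.pyRange_one_eq_nil (by omega)]
    simp only [List.foldl_nil]
    rw [show max n0 1 = 1 from by omega]
    have hG : Genome.length = 0 := by
      rw [← String.length_toList]; omega
    simp [h0, hG, pvF]
    rfl

theorem pvB_items (Genome symbol : String) :
    FasterSymbolArrayIns_alt Genome symbol
    = (List.range (max Genome.toList.length 1)).map (fun (i : Nat) =>
        ((i : Int), pvF (Genome.toList ++ Genome.toList.take (Genome.toList.length / 2)) symbol.toList
          (Genome.toList.length / 2)
          (pvPatternCount symbol.toList (Genome.toList.take (Genome.toList.length / 2))) i)) := by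
  unfold FasterSymbolArrayIns_alt
  simp only [pvFloordiv_two, PySem.List.slice_to_natCast]
  set g := Genome.toList with hg
  set s := symbol.toList with hs
  set n0 := g.length with hn0
  set halfN := n0 / 2 with hhalf
  rw [pvP_fold s (g ++ g.take halfN) [(0:Int)] 0]
  rw [pvFirst_eq s (g.take halfN)]
  set E := g ++ g.take halfN with hE
  set first := pvPatternCount s (g.take halfN) with hfirst
  have hhn : halfN ≤ n0 := by omega
  have hlenE : E.length = n0 + halfN := by
    rw [hE]; simp [List.length_append, List.length_take]; omega
  rw [PySem.Dict.items_foldl_insert_fresh (k := fun (a : Int) => a)]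
  · clear_value E first
    have hitems : (PySem.Dict.empty.insert (0:Int) first).items = [((0:Int), first)] := rfl
    rw [hitems]
    by_cases hn : 1 ≤ n0
    · obtain ⟨m, hm⟩ : ∃ m, n0 = m + 1 := ⟨n0 - 1, by omega⟩
      rw [show max n0 1 = n0 from by omega]
      rw [hm, List.range_succ_eq_map]
      simp only [List.map_cons, List.map_map]
      refine List.cons_eq_cons.mpr ⟨?_, ?_⟩
      · refine Prod.ext rfl ?_
        simp [pvF]
      · have hpr : PySem.List.pyRange 1 (((m + 1 : Nat)) : Int) 1
            = (List.range m).map (fun (k : Nat) => 1 + (k : Int)) := by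
          rw [PySem.List.pyRange_one]
          have : (((m + 1 : Nat) : Int) - 1).toNat = m := by omega
          rw [this]
        rw [hpr, List.map_map]
        apply List.map_congr_left
        intro k hk
        rw [List.mem_range] at hk
        simp only [Function.comp]
        have hc1 : (1 + (k : Int)) = ((k + 1 : Nat) : Int) := by push_cast; ring
        have hc2 : (((k + 1 : Nat) : Int) + (halfN : Int)) = ((k + 1 + halfN : Nat) : Int) := by push_cast; ring
        rw [hc1, hc2]
        rw [PySem.List.pyGetD_natCast, PySem.List.pyGetD_natCast, PySem.List.pyGetD_natCast]
        rw [pvP_getD E s (k+1) (by omega), pvP_getD E s (k+1+halfN) (by omega), pvP_getD E s halfN (by omega)]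
        refine Prod.ext rfl ?_
        rw [pvF_closed E s halfN first n0 hlenE (k+1) (by omega)]
    · have h0 : n0 = 0 := by omega
      rw [show PySem.List.pyRange 1 ((n0 : Nat) : Int) 1 = [] from
        PySem.List.pyRange_one_eq_nil (by omega)]
      rw [show max n0 1 = 1 from by omega]
      simp [pvF]
  · intro a ha
    rw [PySem.List.mem_pyRange_one] at ha
    rw [PySem.Dict.contains_insert]
    have : (a == (0:Int)) = false := by simp; omega
    rw [this]
    simp [PySem.Dict.contains_empty]
  · simpa using PySem.List.nodup_pyRange_one (a := 1) (b := (n0 : Int))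

-- ===== VERDICT (by name: the statement is the Claim_ definition above) =====
theorem FasterSymbolArrayIns_spec : Claim_equal_FasterSymbolArrayIns := by
  intro Genome symbol _
  unfold Spec_FasterSymbolArrayIns
  rw [pvA_items, pvB_items]
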